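-- pv_equiv track=rewrite | github.com/semaphoreP/datacruncher_slackbot | bot.py | choose_folder
-- ===== SOURCE A (Python) =====
-- def choose_folder(folders, date=None, band=None, mode=None):
--     """
--     Given subfolders in an autoreduced directory and some optional specifications,
--     find the best dataset to show
--
--     Args:
--         folders: a list of folders
--         date: datestring (e.g 20141212)
--         band: e.g. H
--         mode Spec or Pol
--     Return:
--         chosen: chosen folder Name. None is nothing is chosen
--     """
--     # boudnary case of no folders
--     if len(folders) == 0:
--         return None
--
--     # limit by date
--     if date is not None:
--         folders = [folder for folder in folders if "{0}_".format(date) in folder]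
--
--     # limit by band
--     if band is not None:
--         folders = [folder for folder in folders if "_{0}_".format(band) in folder]
--
--     # limit by mode
--     if mode is not None:
--         folders = [folder for folder in folders if "_{0}".format(mode) in folder]
--
--     # if more than one, pick a spec dataset in H band preferably. If not, just pick the first
--     if len(folders) > 1:
--         # narrow by spec if Pol not specified
--         if mode is None:
--             spec_folders = [folder for folder in folders if "_{0}".format("Spec") in folder]
--             # if there are spec datsets, let's pick those
--             if len(spec_folders) > 0:
--                 folders = spec_folders
--         # narrow by H band if not specified
--         if band is None:
--             H_folders = [folder for folder in folders if "_{0}_".format("H") in folder]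
--             # if there are H datasets, pick those
--             if len(H_folders) > 0:
--                 folders = H_folders
--
--     # now pick the first one if we haven't removed all choices
--     if len(folders) > 0:
--         chosen = folders[0]
--     else:
--         chosen = None
--     return chosen
-- ===== SOURCE B (Python) =====
-- def choose_folder(folders, date=None, band=None, mode=None):
--     # Single pass: keep the best candidate under a lexicographic preference key.
--     best = None
--     best_key = (-1, -1)
--     for f in folders:
--         if date is not None and (date + "_") not in f:
--             continue
--         if band is not None and ("_" + band + "_") not in f:
--             continue
--         if mode is not None and ("_" + mode) not in f:
--             continue
--         key = (1 if mode is None and "_Spec" in f else 0,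
--                1 if band is None and "_H_" in f else 0)
--         if key > best_key:
--             best = f
--             best_key = key
--     return best
-- ===== Notes on version B (the rewrite author's own statement) =====
-- stated objective: simpler
-- what changed: Replaces A's staged pipeline (three filter passes building intermediate lists, a len>1 guard, a Spec-narrowing pass, an H-narrowing pass, then take the head) by one loop over the input that keeps the best candidate under a lexicographic preference key (Spec-match, H-match), each component disabled when mode/band is given; no intermediate lists are built.
import Mathlib
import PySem

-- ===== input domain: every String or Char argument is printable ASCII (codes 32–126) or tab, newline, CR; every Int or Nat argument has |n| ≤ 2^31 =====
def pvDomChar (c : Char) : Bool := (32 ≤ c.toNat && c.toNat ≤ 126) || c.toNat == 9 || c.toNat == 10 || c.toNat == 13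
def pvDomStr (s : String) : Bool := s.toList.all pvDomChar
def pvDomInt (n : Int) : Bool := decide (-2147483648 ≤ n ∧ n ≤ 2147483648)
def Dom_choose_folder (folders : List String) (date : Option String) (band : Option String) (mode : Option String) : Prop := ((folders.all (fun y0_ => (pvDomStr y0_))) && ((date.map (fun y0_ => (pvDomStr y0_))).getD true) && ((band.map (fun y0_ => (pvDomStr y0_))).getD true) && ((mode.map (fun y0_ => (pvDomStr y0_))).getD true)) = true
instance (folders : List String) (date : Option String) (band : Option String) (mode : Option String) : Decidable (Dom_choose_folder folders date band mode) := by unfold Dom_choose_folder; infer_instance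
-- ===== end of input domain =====

-- B replaces A's staged narrowing (filter copies, then a Spec pass, then an H pass, then take
-- the head) by ONE pass over the input keeping the best candidate under a lexicographic
-- preference key; objective: simpler.

-- ===== PORT A =====
def choose_folder (folders : List String) (date : Option String) (band : Option String) (mode : Option String) : Option String :=
  if folders.length = 0 then none
  else
    let f1 : List String := match date with
      | none => folders
      | some d => folders.filter (fun folder => PySem.Str.isIn (d ++ "_") folder)
    let f2 : List String := match band with
      | none => f1
      | some b => f1.filter (fun folder => PySem.Str.isIn ("_" ++ b ++ "_") folder)
    let f3 : List String := match mode with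
      | none => f2
      | some m => f2.filter (fun folder => PySem.Str.isIn ("_" ++ m) folder)
    let f4 :=
      if 1 < f3.length then
        let f3a :=
          if mode.isNone then
            let spec_folders := f3.filter (fun folder => PySem.Str.isIn "_Spec" folder)
            if 0 < spec_folders.length then spec_folders else f3
          else f3
        if band.isNone then
          let H_folders := f3a.filter (fun folder => PySem.Str.isIn "_H_" folder)
          if 0 < H_folders.length then H_folders else f3a
        else f3a
      else f3
    if 0 < f4.length then PySem.List.pyGet? f4 0 else none

-- ===== PORT B =====
-- the three 'continue' guards of Source B's loop body, as one pass/fail test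
def cfPasses (date band mode : Option String) (f : String) : Bool :=
  (match date with | none => true | some d => PySem.Str.isIn (d ++ "_") f) &&
  (match band with | none => true | some b => PySem.Str.isIn ("_" ++ b ++ "_") f) &&
  (match mode with | none => true | some m => PySem.Str.isIn ("_" ++ m) f)

-- key = (1 if mode is None and "_Spec" in f else 0, 1 if band is None and "_H_" in f else 0)
def cfKey (band mode : Option String) (f : String) : Int × Int :=
  ((if mode.isNone && PySem.Str.isIn "_Spec" f then 1 else 0),
   (if band.isNone && PySem.Str.isIn "_H_" f then 1 else 0))

-- 'if key > best_key: best, best_key = f, key'  (Python tuple > is strict lexicographic)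
def cfStep (band mode : Option String) (st : Option String × (Int × Int)) (f : String) :
    Option String × (Int × Int) :=
  let k := cfKey band mode f
  if decide (st.2.1 < k.1) || (decide (k.1 = st.2.1) && decide (st.2.2 < k.2))
  then (some f, k) else st

def choose_folder_alt (folders : List String) (date : Option String) (band : Option String) (mode : Option String) : Option String :=
  (folders.foldl
    (fun st f => if cfPasses date band mode f then cfStep band mode st f else st)
    ((none : Option String), ((-1 : Int), (-1 : Int)))).1

-- ===== PRECONDITION & SPEC =====
def Spec_choose_folder (folders : List String) (date : Option String) (band : Option String) (mode : Option String) (out : Option String) : Prop := out = choose_folder_alt folders date band mode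
instance (folders : List String) (date : Option String) (band : Option String) (mode : Option String) (out : Option String) : Decidable (Spec_choose_folder folders date band mode out) := by unfold Spec_choose_folder; infer_instance

-- ===== CLAIM (what is proved, stated in full; the proofs are below) =====
def Claim_equal_choose_folder : Prop := ∀ (folders : List String) (date : Option String) (band : Option String) (mode : Option String), Dom_choose_folder folders date band mode → Spec_choose_folder folders date band mode (choose_folder folders date band mode)

-- ===== LEMMAS AND PROOFS =====

-- the first element of m :: t with maximal (p, q)-preference, lexicographically
def pick {α : Type} (p q : α → Bool) (m : α) (t : List α) : α :=
  if p m && q m then m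
  else ((t.filter (fun x => p x && q x)).head?).getD
    (if p m then m
     else ((t.filter p).head?).getD
       (if q m then m
        else ((t.filter q).head?).getD m))

-- head of the (p,q)-selection over a list: none on [], else the pick of head vs tail
def pickHead? {α : Type} (p q : α → Bool) (g : List α) : Option α :=
  match g with
  | [] => none
  | a :: t => some (pick p q a t)

-- cfStep/cfKey with the two tests abstracted (cfStep band mode = gStep P Q definitionally)
def gKey {α : Type} (p q : α → Bool) (x : α) : Int × Int :=
  ((if p x then 1 else 0), (if q x then 1 else 0))

def gStep {α : Type} (p q : α → Bool) (st : Option α × (Int × Int)) (x : α) :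
    Option α × (Int × Int) :=
  let k := gKey p q x
  if decide (st.2.1 < k.1) || (decide (k.1 = st.2.1) && decide (st.2.2 < k.2))
  then (some x, k) else st

-- the loop invariant: starting from a best element m (with its own key), the fold picks
-- the first (p,q)-lexicographically-maximal element of m :: t
lemma foldl_gStep_pick {α : Type} (p q : α → Bool) (t : List α) (m : α) :
    t.foldl (gStep p q) (some m, gKey p q m)
      = (some (pick p q m t), gKey p q (pick p q m t)) := by
  induction t generalizing m with
  | nil =>
    cases hp : p m <;> cases hq : q m <;> simp [pick, hp, hq]
  | cons x t ih =>
    rw [List.foldl_cons]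
    cases hpm : p m <;> cases hqm : q m <;> cases hpx : p x <;> cases hqx : q x <;>
      ((first
        | (have hs : gStep p q (some m, gKey p q m) x = (some x, gKey p q x) := by
             simp only [gStep, gKey, hpm, hqm, hpx, hqx]; norm_num
           rw [hs])
        | (have hs : gStep p q (some m, gKey p q m) x = (some m, gKey p q m) := by
             simp only [gStep, gKey, hpm, hqm, hpx, hqx]; norm_num
           rw [hs]))
       rw [ih]
       simp [pick, hpm, hqm, hpx, hqx])

-- B's fold over a list of survivors computes the pick of the first survivor against the rest
lemma bfold_eval (band mode : Option String) (g : List String) :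
    (g.foldl (cfStep band mode) ((none : Option String), ((-1 : Int), (-1 : Int)))).1
      = pickHead? (fun f => mode.isNone && PySem.Str.isIn "_Spec" f)
                  (fun f => band.isNone && PySem.Str.isIn "_H_" f) g := by
  have hstep : cfStep band mode
      = gStep (fun f => mode.isNone && PySem.Str.isIn "_Spec" f)
              (fun f => band.isNone && PySem.Str.isIn "_H_" f) := rfl
  rw [hstep]
  cases g with
  | nil => rfl
  | cons a t =>
    show _ = some (pick _ _ a t)
    rw [List.foldl_cons]
    have h1 : gStep (fun f => mode.isNone && PySem.Str.isIn "_Spec" f)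
        (fun f => band.isNone && PySem.Str.isIn "_H_" f)
        ((none : Option String), ((-1 : Int), (-1 : Int))) a
        = (some a, gKey (fun f => mode.isNone && PySem.Str.isIn "_Spec" f)
                        (fun f => band.isNone && PySem.Str.isIn "_H_" f) a) := by
      cases hp : (mode.isNone && PySem.Str.isIn "_Spec" a) <;>
        simp only [gStep, gKey, hp] <;> norm_num
    rw [h1, foldl_gStep_pick]

-- head of the staged Spec/H narrowing = the pick
lemma narrow_head {α : Type} (p q : α → Bool) (a : α) (t : List α) :
    (let s := if 0 < ((a :: t).filter p).length then (a :: t).filter p else a :: t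
     let h := if 0 < (s.filter q).length then s.filter q else s
     h.head?) = some (pick p q a t) := by
  have hcomm : (fun x => q x && p x) = (fun x => p x && q x) := funext fun x => Bool.and_comm _ _
  have hC : (∃ x ∈ List.filter p t, q x = true) ↔ ∃ x ∈ t, (p x && q x) = true := by
    constructor
    · rintro ⟨x, hx, hq1⟩
      rw [List.mem_filter] at hx
      exact ⟨x, hx.1, by simp [hx.2, hq1]⟩
    · rintro ⟨x, hx, hq1⟩
      have h2 : p x = true ∧ q x = true := by simpa [Bool.and_eq_true] using hq1
      exact ⟨x, List.mem_filter.2 ⟨hx, h2.1⟩, h2.2⟩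
  cases hpa : p a <;> cases hqa : q a <;>
    simp [pick, hpa, hqa, List.filter_filter, List.head?_filter, hcomm]
  · -- p a = false, q a = false
    by_cases hp : ∃ x ∈ t, p x = true
    · simp only [hp, if_pos]
      by_cases hpq : ∃ x ∈ t, (p x && q x) = true
      · rw [if_pos (hC.mpr hpq), List.filter_filter, hcomm, List.head?_filter]
        obtain ⟨y, hy⟩ := Option.isSome_iff_exists.1 (List.find?_isSome.2 hpq)
        simp [hy]
      · rw [if_neg (fun h => hpq (hC.mp h)), List.head?_filter]
        have hnone : List.find? (fun x => p x && q x) t = none :=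
          List.find?_eq_none.2 (fun x hx h => hpq ⟨x, hx, h⟩)
        obtain ⟨y, hy⟩ := Option.isSome_iff_exists.1 (List.find?_isSome.2 hp)
        simp [hnone, hy]
    · rw [if_neg hp]
      have hnone : List.find? (fun x => p x && q x) t = none := by
        refine List.find?_eq_none.2 (fun x hx h => hp ⟨x, hx, ?_⟩)
        have h2 : p x = true ∧ q x = true := by simpa [Bool.and_eq_true] using h
        exact h2.1
      have hpnone : List.find? p t = none :=
        List.find?_eq_none.2 (fun x hx h => hp ⟨x, hx, h⟩)
      by_cases hq : ∃ x ∈ t, q x = true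
      · have hq' : ∃ x ∈ a :: t, q x = true := by
          obtain ⟨x, hx, h1⟩ := hq; exact ⟨x, List.mem_cons_of_mem _ hx, h1⟩
        rw [if_pos hq']
        obtain ⟨y, hy⟩ := Option.isSome_iff_exists.1 (List.find?_isSome.2 hq)
        simp [hqa, List.head?_filter, hnone, hpnone, hy]
      · have hq' : ¬ ∃ x ∈ a :: t, q x = true := by
          rintro ⟨x, hx, h1⟩
          rcases List.mem_cons.1 hx with rfl | hx'
          · simp [hqa] at h1
          · exact hq ⟨x, hx', h1⟩
        rw [if_neg hq']
        have hqnone : List.find? q t = none :=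
          List.find?_eq_none.2 (fun x hx h => hq ⟨x, hx, h⟩)
        simp [hnone, hpnone, hqnone]
  · -- p a = false, q a = true
    by_cases hp : ∃ x ∈ t, p x = true
    · simp only [hp, if_pos]
      by_cases hpq : ∃ x ∈ t, (p x && q x) = true
      · rw [if_pos (hC.mpr hpq), List.filter_filter, hcomm, List.head?_filter]
        obtain ⟨y, hy⟩ := Option.isSome_iff_exists.1 (List.find?_isSome.2 hpq)
        simp [hy]
      · rw [if_neg (fun h => hpq (hC.mp h)), List.head?_filter]
        have hnone : List.find? (fun x => p x && q x) t = none :=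
          List.find?_eq_none.2 (fun x hx h => hpq ⟨x, hx, h⟩)
        obtain ⟨y, hy⟩ := Option.isSome_iff_exists.1 (List.find?_isSome.2 hp)
        simp [hnone, hy]
    · rw [if_neg hp]
      have hnone : List.find? (fun x => p x && q x) t = none := by
        refine List.find?_eq_none.2 (fun x hx h => hp ⟨x, hx, ?_⟩)
        have h2 : p x = true ∧ q x = true := by simpa [Bool.and_eq_true] using h
        exact h2.1
      have hpnone : List.find? p t = none :=
        List.find?_eq_none.2 (fun x hx h => hp ⟨x, hx, h⟩)
      have hq' : ∃ x ∈ a :: t, q x = true := ⟨a, List.mem_cons_self, hqa⟩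
      rw [if_pos hq']
      simp [hqa, hnone, hpnone]
  · -- p a = true, q a = false
    by_cases hpq : ∃ x ∈ t, p x = true ∧ q x = true
    · rw [if_pos hpq, List.head?_filter]
      have hpq2 : ∃ x ∈ t, (p x && q x) = true := by
        obtain ⟨x, hx, h1, h2⟩ := hpq; exact ⟨x, hx, by simp [h1, h2]⟩
      obtain ⟨y, hy⟩ := Option.isSome_iff_exists.1 (List.find?_isSome.2 hpq2)
      simp [hy]
    · rw [if_neg hpq]
      have hnone : List.find? (fun x => p x && q x) t = none := by
        refine List.find?_eq_none.2 (fun x hx h => hpq ⟨x, hx, ?_⟩)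
        simpa [Bool.and_eq_true] using h
      simp [hnone]

lemma get0_head {α : Type} (l : List α) :
    (if 0 < l.length then PySem.List.pyGet? l 0 else none) = l.head? := by
  cases l <;> simp

-- A's whole post-filter stage computes the pick of the first survivor against the rest
lemma final_eq {α : Type} (P Q : α → Bool) (mb sb : Bool) (g : List α) :
    (let f4 :=
      if 1 < g.length then
        let f3a :=
          if mb then
            let spec_folders := g.filter P
            if 0 < spec_folders.length then spec_folders else g
          else g
        if sb then
          let H_folders := f3a.filter Q
          if 0 < H_folders.length then H_folders else f3a
        else f3a
      else g
     if 0 < f4.length then PySem.List.pyGet? f4 0 else none)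
    = pickHead? (fun x => mb && P x) (fun x => sb && Q x) g := by
  dsimp only
  cases g with
  | nil => simp [pickHead?]
  | cons a t =>
    cases t with
    | nil =>
      rw [if_neg (by simp : ¬ (1 < ([a] : List α).length))]
      cases hp : (mb && P a) <;> cases hq : (sb && Q a) <;>
        simp [pickHead?, pick, hp, hq]
    | cons b t' =>
      show _ = some (pick _ _ a (b :: t'))
      rw [if_pos (by simp : 1 < (a :: b :: t').length)]
      have hP : (fun x => mb && P x) = (if mb then P else fun _ => false) := by
        cases mb <;> simp
      have hQ : (fun x => sb && Q x) = (if sb then Q else fun _ => false) := by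
        cases sb <;> simp
      cases mb <;> cases sb <;>
        simp only [hP, hQ, if_true, if_false, Bool.false_eq_true] <;>
        rw [show (some (pick _ _ a (b :: t')) : Option α) = _ from (narrow_head _ _ a (b :: t')).symm] <;>
        simp [get0_head, List.filter_false, List.length_cons]

-- the three staged filters of A equal one filter by the combined pass test of B
lemma filter_fuse (folders : List String) (date band mode : Option String) :
    folders.filter (fun f => cfPasses date band mode f)
      = (let f1 : List String := match date with
           | none => folders
           | some d => folders.filter (fun folder => PySem.Str.isIn (d ++ "_") folder)
         let f2 : List String := match band with
           | none => f1
           | some b => f1.filter (fun folder => PySem.Str.isIn ("_" ++ b ++ "_") folder)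
         match mode with
           | none => f2
           | some m => f2.filter (fun folder => PySem.Str.isIn ("_" ++ m) folder)) := by
  cases date <;> cases band <;> cases mode <;>
    simp [cfPasses, List.filter_filter, Bool.and_comm, Bool.and_assoc]

-- ===== VERDICT (by name: the statement is the Claim_ definition above) =====
theorem choose_folder_spec : Claim_equal_choose_folder := by
  unfold Claim_equal_choose_folder
  intro folders date band mode _
  unfold Spec_choose_folder choose_folder choose_folder_alt
  rw [← List.foldl_filter, filter_fuse folders date band mode]
  cases folders with
  | nil => cases date <;> cases band <;> cases mode <;> simp
  | cons a fs =>
    rw [if_neg (by simp : ¬ ((a :: fs).length = 0))]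
    rw [bfold_eval]
    exact final_eq (fun folder => PySem.Str.isIn "_Spec" folder)
      (fun folder => PySem.Str.isIn "_H_" folder) mode.isNone band.isNone _
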